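-- pv_equiv track=rewrite | github.com/rahulrathi123/UCSFResearch | multitask.py | clean_impressions
-- ===== SOURCE A (Python) =====
-- def clean_impressions(impressions):
--     delete_words = ["IMPRESSION:\n", "END", "OF", "IMPRESSION:\n", "\n"]
--     end_of_impression = ["Report", "dictated"]
--
--     impressions_list = []
--     for impression in impressions:
--         sentence = []
--         word = []
--         for character in impression:
--             if (character != " "):
--                 word.append(character)
--             else:
--                 sentence.append(word)
--                 word = []
--
--         sentence2 = []
--         word2 = []
--
--         for word in sentence:
--             word2 = ''.join(word)
--             if (word2 == "Report"):
--                 break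
--             if (word2 == "//Impression"):
--                 break
--             if (word2 == "//Impressio"):
--                 break
--             sentence2.append(word2)
--
--         sentence3 = []
--         for word in sentence2:
--             if word not in delete_words:
--                 sentence3.append(word)
--         sentence4 = ' '.join(sentence3)
--         impressions_list.append(sentence4)
--     return impressions_list
-- ===== SOURCE B (Python) =====
-- def clean_impressions(impressions):
--     stop_words = ("Report", "//Impression", "//Impressio")
--     delete_words = ("IMPRESSION:\n", "END", "OF", "\n")
--     impressions_list = []
--     for impression in impressions:
--         cleaned = []
--         for token in impression.split(' ')[:-1]:
--             if token in stop_words: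
--                 break
--             if token not in delete_words:
--                 cleaned.append(token)
--         impressions_list.append(' '.join(cleaned))
--     return impressions_list
-- ===== Notes on version B (the rewrite author's own statement) =====
-- stated objective: simpler
-- what changed: Replaces A's three separate passes (manual char-by-char tokenizer, truncate loop, filter loop) with one library split(' ')[:-1] plus a single fused loop that breaks on stop words and filters delete words as it goes.
import Mathlib
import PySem

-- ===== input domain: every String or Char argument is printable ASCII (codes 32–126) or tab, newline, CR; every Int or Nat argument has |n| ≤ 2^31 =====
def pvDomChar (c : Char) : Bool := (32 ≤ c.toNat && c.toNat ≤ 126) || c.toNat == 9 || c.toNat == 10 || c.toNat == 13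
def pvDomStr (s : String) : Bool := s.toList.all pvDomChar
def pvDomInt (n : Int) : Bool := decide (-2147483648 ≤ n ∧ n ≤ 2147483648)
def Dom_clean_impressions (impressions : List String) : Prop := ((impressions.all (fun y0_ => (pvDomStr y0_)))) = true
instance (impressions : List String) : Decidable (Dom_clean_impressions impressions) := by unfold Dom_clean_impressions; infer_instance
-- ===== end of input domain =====

-- B replaces A's three separate passes (manual char tokenizer, truncate loop, filter loop)
-- with one library split plus a single fused loop; same cost, simpler.

-- ===== PORT A =====
def pvA_delete_words : List String := ["IMPRESSION:\n", "END", "OF", "IMPRESSION:\n", "\n"]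

-- the inner character loop: state (sentence, word)
def pvA_tokStep (st : List (List Char) × List Char) (c : Char) : List (List Char) × List Char :=
  if c ≠ ' ' then (st.1, st.2 ++ [c]) else (st.1 ++ [st.2], [])

-- the second loop: word2 = ''.join(word) (exact: word is a list of characters, so the join is String.ofList);
-- break is the empty continuation
def pvA_trunc : List (List Char) → List String
  | [] => []
  | w :: ws =>
    let w2 := String.ofList w
    if w2 = "Report" then []
    else if w2 = "//Impression" then []
    else if w2 = "//Impressio" then []
    else w2 :: pvA_trunc ws

def clean_impressions (impressions : List String) : List String :=
  impressions.foldl (fun impressions_list impression =>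
    let st := impression.toList.foldl pvA_tokStep ([], [])
    let sentence := st.1
    let sentence2 := pvA_trunc sentence
    let sentence3 := sentence2.foldl (fun acc w =>
      if decide (w ∈ pvA_delete_words) then acc else acc ++ [w]) []
    let sentence4 := PySem.Str.join " " sentence3
    impressions_list ++ [sentence4]) []

-- ===== PORT B =====
def pvB_stop_words : List String := ["Report", "//Impression", "//Impressio"]
def pvB_delete_words : List String := ["IMPRESSION:\n", "END", "OF", "\n"]

-- the single fused loop: break on a stop word, skip delete words, keep the rest
def pvB_clean : List String → List String
  | [] => []
  | t :: ts =>
    if decide (t ∈ pvB_stop_words) then []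
    else if decide (t ∈ pvB_delete_words) then pvB_clean ts
    else t :: pvB_clean ts

def clean_impressions_alt (impressions : List String) : List String :=
  impressions.map (fun impression =>
    -- impression.split(' ')[:-1]; the separator " " is a nonempty literal, so split? is always `some`
    let tokens := PySem.List.slice ((PySem.Str.split? impression " ").getD []) none (some (-1))
    PySem.Str.join " " (pvB_clean tokens))

-- ===== PRECONDITION & SPEC =====
def Spec_clean_impressions (impressions : List String) (out : List String) : Prop := out = clean_impressions_alt impressions
instance (impressions : List String) (out : List String) : Decidable (Spec_clean_impressions impressions out) := by unfold Spec_clean_impressions; infer_instance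

-- ===== CLAIM (what is proved, stated in full; the proofs are below) =====
def Claim_equal_clean_impressions : Prop := ∀ (impressions : List String), Dom_clean_impressions impressions → Spec_clean_impressions impressions (clean_impressions impressions)

-- ===== LEMMAS AND PROOFS =====

-- the pieces of a string split on ' ' (structural-recursion characterisation of split)
def pvPieces : List Char → List (List Char)
  | [] => [[]]
  | c :: rest =>
    if c = ' ' then [] :: pvPieces rest
    else (pvPieces rest).modifyHead (c :: ·)

theorem pvPieces_ne_nil (cs : List Char) : pvPieces cs ≠ [] := by
  induction cs with
  | nil => simp [pvPieces]
  | cons c rest ih =>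
    simp only [pvPieces]
    split
    · simp
    · cases h : pvPieces rest with
      | nil => exact absurd h ih
      | cons p ps => simp [List.modifyHead]

theorem pvSplitOn_go_spec (fuel : Nat) :
    ∀ (l cur : List Char) (acc : List (List Char)), l.length ≤ fuel →
      PySem.Chars.splitOn.go [' '] fuel l cur acc =
        acc.reverse ++ ((pvPieces l).modifyHead (cur.reverse ++ ·)) := by
  induction fuel with
  | zero =>
    intro l cur acc h
    have hl : l = [] := List.eq_nil_of_length_eq_zero (Nat.le_zero.mp h)
    subst hl
    simp [PySem.Chars.splitOn.go, pvPieces, List.modifyHead]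
  | succ fuel ih =>
    intro l cur acc h
    cases l with
    | nil => simp [PySem.Chars.splitOn.go, pvPieces, List.modifyHead]
    | cons c rest =>
      simp only [PySem.Chars.splitOn.go]
      by_cases hc : c = ' '
      · subst hc
        have hpre : List.isPrefixOf [' '] (' ' :: rest) = true := by
          simp [List.isPrefixOf]
        rw [if_pos hpre]
        have : List.drop (List.length [' ']) (' ' :: rest) = rest := by simp
        rw [this, ih rest [] (cur.reverse :: acc) (by simpa using Nat.le_of_succ_le_succ h)]
        simp only [pvPieces, List.modifyHead, List.reverse_cons, List.append_assoc,
          List.singleton_append, List.reverse_nil, List.nil_append]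
        cases pvPieces rest <;> simp
      · have hpre : List.isPrefixOf [' '] (c :: rest) = false := by
          simp [List.isPrefixOf]
          exact fun h => hc h.symm
        rw [if_neg (by simp [hpre])]
        rw [ih rest (c :: cur) acc (by simpa using Nat.le_of_succ_le_succ h)]
        simp only [pvPieces, if_neg hc]
        cases hps : pvPieces rest with
        | nil => exact absurd hps (pvPieces_ne_nil rest)
        | cons p ps => simp [List.modifyHead]

theorem pvSplitOn_eq_pieces (cs : List Char) :
    PySem.Chars.splitOn cs [' '] = pvPieces cs := by
  unfold PySem.Chars.splitOn
  rw [pvSplitOn_go_spec (cs.length + 1) cs [] [] (Nat.le_succ _)]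
  cases pvPieces cs <;> simp [List.modifyHead]

-- A's character loop computes the same pieces (the collected sentence is all pieces but the last)
theorem pvA_tok_spec (cs : List Char) :
    ∀ (s : List (List Char)) (w : List Char),
      cs.foldl pvA_tokStep (s, w) =
        (s ++ ((pvPieces cs).modifyHead (w ++ ·)).dropLast,
         ((pvPieces cs).modifyHead (w ++ ·)).getLastD []) := by
  induction cs with
  | nil => intro s w; simp [pvPieces, List.modifyHead]
  | cons c rest ih =>
    intro s w
    by_cases hc : c = ' '
    · subst hc
      have hstep : pvA_tokStep (s, w) ' ' = (s ++ [w], []) := by simp [pvA_tokStep]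
      simp only [List.foldl_cons, hstep, ih]
      cases h : pvPieces rest with
      | nil => exact absurd h (pvPieces_ne_nil rest)
      | cons p ps =>
        simp only [pvPieces, h, List.modifyHead]
        cases ps <;> simp
    · have hstep : pvA_tokStep (s, w) c = (s, w ++ [c]) := by simp [pvA_tokStep, hc]
      simp only [List.foldl_cons, hstep, ih]
      cases h : pvPieces rest with
      | nil => exact absurd h (pvPieces_ne_nil rest)
      | cons p ps =>
        simp only [pvPieces, if_neg hc, h, List.modifyHead]
        cases ps <;> simp

theorem pvA_sentence_eq (cs : List Char) :
    (cs.foldl pvA_tokStep ([], [])).1 = (pvPieces cs).dropLast := by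
  rw [pvA_tok_spec cs [] []]
  cases pvPieces cs <;> simp [List.modifyHead]

-- fusing truncate-then-filter into B's single loop
theorem pvB_clean_eq (ps : List (List Char)) :
    pvB_clean (ps.map String.ofList) =
      (pvA_trunc ps).filter (fun w => !decide (w ∈ pvA_delete_words)) := by
  induction ps with
  | nil => simp [pvB_clean, pvA_trunc]
  | cons p rest ih =>
    simp only [List.map_cons, pvB_clean, pvA_trunc]
    by_cases hstop : String.ofList p ∈ pvB_stop_words
    · rw [if_pos (by simpa using hstop)]
      simp only [pvB_stop_words, List.mem_cons, List.not_mem_nil, or_false] at hstop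
      rcases hstop with h | h | h
      · simp [h]
      · simp [h]
      · simp [h]
    · rw [if_neg (by simpa using hstop)]
      simp only [pvB_stop_words, List.mem_cons, List.not_mem_nil, or_false] at hstop
      rw [not_or, not_or] at hstop
      obtain ⟨h1, h2, h3⟩ := hstop
      simp only [if_neg h1, if_neg h2, if_neg h3]
      by_cases hdel : String.ofList p ∈ pvB_delete_words
      · have hdelA : String.ofList p ∈ pvA_delete_words := by
          simp only [pvB_delete_words, List.mem_cons, List.not_mem_nil, or_false] at hdel
          simp only [pvA_delete_words, List.mem_cons]
          tauto
        rw [if_pos (by simpa using hdel)]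
        simp [List.filter, hdelA, ih]
      · have hdelA : String.ofList p ∉ pvA_delete_words := by
          simp only [pvB_delete_words, List.mem_cons, List.not_mem_nil, or_false] at hdel
          simp only [pvA_delete_words, List.mem_cons, List.not_mem_nil, or_false]
          tauto
        rw [if_neg (by simpa using hdel)]
        simp [List.filter, hdelA, ih]

-- the per-impression results coincide
theorem pv_each (impression : String) :
    PySem.Str.join " "
      ((pvA_trunc (impression.toList.foldl pvA_tokStep ([], [])).1).foldl
        (fun acc w => if decide (w ∈ pvA_delete_words) then acc else acc ++ [w]) []) =
    PySem.Str.join " "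
      (pvB_clean (PySem.List.slice ((PySem.Str.split? impression " ").getD []) none (some (-1)))) := by
  have hsplit : (PySem.Str.split? impression " ").getD []
      = (PySem.Chars.splitOn impression.toList [' ']).map String.ofList := by
    simp [PySem.Str.split?, PySem.Chars.split?]
  rw [hsplit, PySem.List.slice_to_neg_one, pvSplitOn_eq_pieces, ← List.map_dropLast,
      pvB_clean_eq, pvA_sentence_eq]
  have hfun : (fun (acc : List String) w =>
        if decide (w ∈ pvA_delete_words) then acc else acc ++ [w])
      = (fun acc w => if (fun w => !decide (w ∈ pvA_delete_words)) w = true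
          then acc ++ [id w] else acc) := by
    funext acc w
    by_cases h : w ∈ pvA_delete_words <;> simp [h]
  rw [hfun, PySem.List.foldl_append_if]
  simp

-- ===== VERDICT (by name: the statement is the Claim_ definition above) =====
theorem clean_impressions_spec : Claim_equal_clean_impressions := by
  intro impressions _
  unfold Spec_clean_impressions clean_impressions clean_impressions_alt
  rw [PySem.List.foldl_append_singleton_eq_map]
  simp only [List.nil_append]
  apply List.map_congr_left
  intro impression _
  exact pv_each impression
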